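-- pv_equiv track=rewrite | github.com/ThenTech/BDA-Assignments | Plagiarism/Resources/submissions/submissions/3565845.py | check
-- ===== SOURCE A (Python) =====
-- def check(mx):
--     count = 0
--     tot_count = 0
--     for row in mx:
--         for element in row:
--             tot_count += 1
--         count += 1
--     if len(mx) != count or tot_count // len(mx) != len(mx):
--         return False
--
--     elems = []
--     for row in mx:
--         for element in row:
--             if element not in elems:
--                 elems.append(element)
--             else:
--                 return False
--
--     return True
-- ===== SOURCE B (Python) =====
-- def check(mx):
--     flat = sorted(e for row in mx for e in row)
--     if len(flat) // len(mx) != len(mx):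
--         return False
--     return all(a < b for a, b in zip(flat, flat[1:]))
-- ===== Notes on version B (the rewrite author's own statement) =====
-- stated objective: alternative
-- what changed: B sorts the flattened matrix once and decides distinctness by a single adjacent-pairs strict-increase scan (sort-then-scan), replacing A's manual counting loops and quadratic incremental membership-scan with early return.
import Mathlib
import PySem

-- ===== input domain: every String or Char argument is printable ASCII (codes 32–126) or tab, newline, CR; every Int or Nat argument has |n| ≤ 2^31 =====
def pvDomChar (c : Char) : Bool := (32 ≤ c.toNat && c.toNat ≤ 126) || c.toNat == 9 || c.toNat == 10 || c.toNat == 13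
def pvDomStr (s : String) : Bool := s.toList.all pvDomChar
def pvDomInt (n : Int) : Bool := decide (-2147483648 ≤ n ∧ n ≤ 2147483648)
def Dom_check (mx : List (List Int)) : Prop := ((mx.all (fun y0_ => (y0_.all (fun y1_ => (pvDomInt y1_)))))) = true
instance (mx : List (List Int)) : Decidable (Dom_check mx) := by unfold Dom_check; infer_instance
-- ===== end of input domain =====

-- B sorts the flattened matrix and checks adjacent pairs strictly increase, replacing A's counting loops and incremental membership-scan (alternative algorithm).

-- ===== PORT A =====
-- inner distinctness scan of one row: append unseen elements, none = Python's 'return False'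
def checkScanRow : List Int → List Int → Option (List Int)
  | elems, [] => some elems
  | elems, e :: rest =>
    if elems.contains e then none else checkScanRow (elems ++ [e]) rest

def checkScanRows : List Int → List (List Int) → Bool
  | _, [] => true
  | elems, row :: rest =>
    match checkScanRow elems row with
    | none => false
    | some elems' => checkScanRows elems' rest

def check (mx : List (List Int)) : Bool :=
  let ct := mx.foldl (fun (p : Int × Int) row =>
      (p.1 + 1, row.foldl (fun t _ => t + 1) p.2)) (0, 0)
  if (mx.length : Int) ≠ ct.1 ∨ PySem.Int.floordiv ct.2 (mx.length : Int) ≠ (mx.length : Int) then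
    false
  else
    checkScanRows [] mx

-- ===== PORT B =====
def check_alt (mx : List (List Int)) : Bool :=
  let flat := PySem.List.sorted (mx.flatMap (fun row => row)) (fun x => x) false
  if PySem.Int.floordiv (flat.length : Int) (mx.length : Int) ≠ (mx.length : Int) then
    false
  else
    (flat.zip (flat.drop 1)).all (fun p => p.1 < p.2)

-- ===== PRECONDITION & SPEC =====
-- Pre_ excludes the empty matrix, on which both A and B raise ZeroDivisionError (len(mx) == 0).
def Pre_check (mx : List (List Int)) : Prop := mx ≠ []
instance (mx : List (List Int)) : Decidable (Pre_check mx) := by unfold Pre_check; infer_instance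
def pvWitness_check : List (List Int) := [[1, 2], [3, 4]]
def Spec_check (mx : List (List Int)) (out : Bool) : Prop := out = check_alt mx
instance (mx : List (List Int)) (out : Bool) : Decidable (Spec_check mx out) := by unfold Spec_check; infer_instance

-- ===== CLAIM (what is proved, stated in full; the proofs are below) =====
def Claim_equal_check : Prop := ∀ (mx : List (List Int)), Dom_check mx → Pre_check mx → Spec_check mx (check mx)

-- ===== LEMMAS AND PROOFS =====

theorem foldl_len_int (row : List Int) (t : Int) :
    row.foldl (fun t _ => t + 1) t = t + row.length := by
  induction row generalizing t with
  | nil => simp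
  | cons x xs ih => simp [List.foldl, ih]; ring

theorem count_tot (mx : List (List Int)) :
    mx.foldl (fun (p : Int × Int) row =>
      (p.1 + 1, row.foldl (fun t _ => t + 1) p.2)) (0, 0)
    = ((mx.length : Int), (mx.flatten.length : Int)) := by
  suffices h : ∀ (c t : Int), mx.foldl (fun (p : Int × Int) row =>
      (p.1 + 1, row.foldl (fun t _ => t + 1) p.2)) (c, t)
      = (c + mx.length, t + mx.flatten.length) by
    simpa using h 0 0
  induction mx with
  | nil => intro c t; simp
  | cons r rs ih =>
    intro c t
    simp only [List.foldl_cons]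
    rw [foldl_len_int, ih]
    simp only [List.flatten_cons, List.length_cons, List.length_append, Prod.mk.injEq]
    constructor <;> push_cast <;> ring

theorem scanRow_eq (row : List Int) (elems : List Int) (h : elems.Nodup) :
    checkScanRow elems row =
      if (elems ++ row).Nodup then some (elems ++ row) else none := by
  induction row generalizing elems with
  | nil => simp [checkScanRow, h]
  | cons e rest ih =>
    by_cases he : e ∈ elems
    · have : ¬ (elems ++ e :: rest).Nodup := by
        intro hn
        exact (List.disjoint_of_nodup_append hn) he (List.mem_cons_self)
      simp [checkScanRow, he, this]
    · have h' : (elems ++ [e]).Nodup := by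
        simp only [List.nodup_append, List.nodup_singleton]
        refine ⟨h, trivial, by intro a ha b hb; simp at hb; subst hb; exact fun hab => he (hab ▸ ha)⟩
      rw [checkScanRow, if_neg (by simpa using he), ih _ h']
      simp [List.append_assoc]

theorem scanRows_eq (mx : List (List Int)) (elems : List Int) (h : elems.Nodup) :
    checkScanRows elems mx = decide (elems ++ mx.flatten).Nodup := by
  induction mx generalizing elems with
  | nil => simp [checkScanRows, h]
  | cons row rest ih =>
    rw [checkScanRows, scanRow_eq _ _ h]
    by_cases hn : (elems ++ row).Nodup
    · rw [if_pos hn]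
      dsimp only
      rw [ih _ hn]
      simp [List.append_assoc]
    · rw [if_neg hn]
      have hsub : (elems ++ row).Sublist (elems ++ (row :: rest).flatten) := by
        rw [List.flatten_cons, ← List.append_assoc]
        exact List.sublist_append_left _ _
      have hc : ¬ (elems ++ (row ++ rest.flatten)).Nodup := fun hc => by
        rw [List.flatten_cons] at hsub
        exact hn (hc.sublist hsub)
      simp [hc]

-- the adjacent-pairs scan is exactly Chain' (<)
theorem zip_all_chain (s : List Int) :
    ((s.zip (s.drop 1)).all (fun p => p.1 < p.2)) = decide (s.IsChain (· < ·)) := by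
  induction s with
  | nil => simp
  | cons a t ih =>
    cases t with
    | nil => simp
    | cons b u =>
      simp only [List.drop_succ_cons, List.drop_zero, List.zip_cons_cons, List.all_cons,
        List.isChain_cons_cons] at *
      rw [ih]
      by_cases hab : a < b <;> simp [hab]

-- on a ≤-sorted list, adjacent strict increase ⟺ no duplicates
theorem chain_iff_nodup (s : List Int) (hs : s.Pairwise (· ≤ ·)) :
    s.IsChain (· < ·) ↔ s.Nodup := by
  rw [List.isChain_iff_pairwise]
  constructor
  · intro h; exact h.imp ne_of_lt
  · intro h
    exact (hs.and h).imp (fun hp => lt_of_le_of_ne hp.1 hp.2)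

-- ===== VERDICT (by name: the statement is the Claim_ definition above) =====
theorem check_spec : Claim_equal_check := by
  intro mx _ hpre
  unfold Spec_check check check_alt
  dsimp only
  rw [count_tot]
  have hfl : mx.flatMap (fun row => row) = mx.flatten := by
    induction mx with
    | nil => rfl
    | cons a t ih => simp
  rw [hfl]
  have hperm : (PySem.List.sorted mx.flatten (fun x => x) false).Perm mx.flatten :=
    PySem.List.sorted_perm mx.flatten (fun x => x) false
  have hlen : (PySem.List.sorted mx.flatten (fun x => x) false).length = mx.flatten.length :=
    hperm.length_eq
  rw [hlen]
  by_cases hg : PySem.Int.floordiv (mx.flatten.length : Int) (mx.length : Int) = (mx.length : Int)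
  · rw [if_neg (by simpa using hg), if_neg (by simpa using hg)]
    rw [scanRows_eq mx [] List.nodup_nil, List.nil_append]
    rw [zip_all_chain]
    have hpw : (PySem.List.sorted mx.flatten (fun x => x) false).Pairwise (· ≤ ·) := by
      simpa using PySem.List.sorted_pairwise mx.flatten (fun x => x)
    rw [decide_eq_decide.mpr (chain_iff_nodup _ hpw), decide_eq_decide.mpr hperm.nodup_iff]
    infer_instance
  · rw [if_pos (by simpa using hg), if_pos (by simpa using hg)]
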